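-- pv_equiv track=rewrite | github.com/miliar/Code_Jam_Webscraper | solutions_python/solutions_year15_round0_nr1/2079.py | calc
-- ===== SOURCE A (Python) =====
-- def calc(nums):
--     numlist = list(nums)
--     count = 0
--     need = 0
--     for idx, val in enumerate(numlist):
--         count += int(val)
--         if count < idx + 1:
--             need += (idx + 1) - count
--             count += (idx + 1) - count
--     return need
-- ===== SOURCE B (Python) =====
-- def calc(nums):
--     vals = [int(v) for v in list(nums)]
--     prefixes = []
--     s = 0
--     for v in vals:
--         s += v
--         prefixes.append(s)
--     deficits = [i + 1 - p for i, p in enumerate(prefixes)]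
--     return max([0] + deficits)
-- ===== Notes on version B (the rewrite author's own statement) =====
-- stated objective: alternative
-- what changed: B replaces A's stateful count-patching loop (accumulating incremental deficits into a patched counter) by a staged list pipeline: materialise the true prefix sums, map them to shortfalls (i+1)-prefix_i, and return the maximum of 0 and these shortfalls.
import Mathlib
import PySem

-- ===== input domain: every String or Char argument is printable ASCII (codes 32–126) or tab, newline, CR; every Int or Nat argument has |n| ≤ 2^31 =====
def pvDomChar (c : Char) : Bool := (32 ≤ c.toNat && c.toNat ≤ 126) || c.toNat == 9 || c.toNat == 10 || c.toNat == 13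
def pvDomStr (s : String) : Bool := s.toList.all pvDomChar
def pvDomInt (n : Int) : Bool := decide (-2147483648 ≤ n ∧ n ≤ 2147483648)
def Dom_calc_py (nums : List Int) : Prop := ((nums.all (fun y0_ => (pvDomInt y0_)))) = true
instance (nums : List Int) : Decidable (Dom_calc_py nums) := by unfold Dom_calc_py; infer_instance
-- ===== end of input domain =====

-- B replaces A's stateful count-patching loop by a staged pipeline: the prefix-sum
-- list, a mapped shortfall list (i+1)-prefix_i, and the maximum of 0 and those.


-- ===== PORT A =====
-- loop over enumerate(numlist) with state (count, need); int(val) is identity on Int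
def calcALoop : List Int → Int → Int → Int → Int
  | [], _, _, need => need
  | v :: rest, idx, count, need =>
    let count := count + v
    if count < idx + 1 then
      calcALoop rest (idx + 1) (count + ((idx + 1) - count)) (need + ((idx + 1) - count))
    else
      calcALoop rest (idx + 1) count need

def calc_py (nums : List Int) : Int := calcALoop nums 0 0 0

-- ===== PORT B =====
-- prefixes: the append-loop building the running prefix sums (int(v) is identity on Int)
def calcPrefixes : List Int → Int → List Int
  | [], _ => []
  | v :: rest, s => (s + v) :: calcPrefixes rest (s + v)

-- deficits comprehension, then max([0] + deficits): since the list starts with the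
-- literal 0, Python's max over it is exactly foldl max 0 over deficits (Ints: ties are equal values)
def calc_py_alt (nums : List Int) : Int :=
  let prefixes := calcPrefixes nums 0
  let deficits := (PySem.List.enumerate prefixes 0).map (fun p => p.1 + 1 - p.2)
  List.foldl max 0 deficits

-- ===== PRECONDITION & SPEC =====
def Spec_calc_py (nums : List Int) (out : Int) : Prop := out = calc_py_alt nums
instance (nums : List Int) (out : Int) : Decidable (Spec_calc_py nums out) := by unfold Spec_calc_py; infer_instance

-- ===== CLAIM (what is proved, stated in full; the proofs are below) =====
def Claim_equal_calc_py : Prop := ∀ (nums : List Int), Dom_calc_py nums → Spec_calc_py nums (calc_py nums)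

-- ===== LEMMAS AND PROOFS =====
-- Invariant: A's patched count is s + need where s is the true prefix sum, and A's
-- need accumulator ends up as the running maximum of need and the later shortfalls.
theorem calcLoop_eq (xs : List Int) : ∀ (idx s need : Int),
    calcALoop xs idx (s + need) need
      = List.foldl max need
          ((PySem.List.enumerate (calcPrefixes xs s) idx).map (fun p => p.1 + 1 - p.2)) := by
  induction xs with
  | nil => intro idx s need; simp [calcALoop, calcPrefixes, PySem.List.enumerate_nil]
  | cons v rest ih =>
    intro idx s need
    simp only [calcALoop, calcPrefixes, PySem.List.enumerate_cons, List.map_cons, List.foldl_cons]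
    by_cases h : s + need + v < idx + 1
    · rw [if_pos (by omega)]
      have hmax : max need (idx + 1 - (s + v)) = idx + 1 - (s + v) := by omega
      have e1 : need + (idx + 1 - (s + need + v)) = idx + 1 - (s + v) := by ring
      have e2 : s + need + v + (idx + 1 - (s + need + v))
          = (s + v) + (idx + 1 - (s + v)) := by ring
      rw [hmax, e1, e2, ih]
    · rw [if_neg (by omega)]
      have hmax : max need (idx + 1 - (s + v)) = need := by omega
      rw [hmax, ← ih (idx + 1) (s + v) need]
      congr 1
      ring

-- ===== VERDICT (by name: the statement is the Claim_ definition above) =====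
theorem calc_py_spec : Claim_equal_calc_py := by
  intro nums _
  unfold Spec_calc_py calc_py calc_py_alt
  simpa using calcLoop_eq nums 0 0 0
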